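-- pv_equiv track=rewrite | github.com/SLP25/aeonius | test_files/rec50.py | maisCentral
-- ===== SOURCE A (Python) =====
-- def maisCentral(l):
--     h,*t=l
--     if [h]==l:return h
--     rt=maisCentral(t)
--     x1=rt['x']
--     y1=rt['y']
--     x=h['x']
--     y=h['y']
--     d1 = (x1 ^ 2) + (y1 ^ 2)
--     d = (x ^ 2) + (y ^ 2)
--     return h if d <= d1 else rt
-- ===== SOURCE B (Python) =====
-- def maisCentral(l):
--     first, *rest = l
--     best = first
--     for e in rest:
--         if (e['x'] ^ 2) + (e['y'] ^ 2) < (best['x'] ^ 2) + (best['y'] ^ 2):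
--             best = e
--     return best
-- ===== Notes on version B (the rewrite author's own statement) =====
-- stated objective: simpler
-- what changed: Replaced the right-folding recursion with a single iterative left-to-right pass keeping the current best (strict < preserves leftmost-wins ties).
import Mathlib
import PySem

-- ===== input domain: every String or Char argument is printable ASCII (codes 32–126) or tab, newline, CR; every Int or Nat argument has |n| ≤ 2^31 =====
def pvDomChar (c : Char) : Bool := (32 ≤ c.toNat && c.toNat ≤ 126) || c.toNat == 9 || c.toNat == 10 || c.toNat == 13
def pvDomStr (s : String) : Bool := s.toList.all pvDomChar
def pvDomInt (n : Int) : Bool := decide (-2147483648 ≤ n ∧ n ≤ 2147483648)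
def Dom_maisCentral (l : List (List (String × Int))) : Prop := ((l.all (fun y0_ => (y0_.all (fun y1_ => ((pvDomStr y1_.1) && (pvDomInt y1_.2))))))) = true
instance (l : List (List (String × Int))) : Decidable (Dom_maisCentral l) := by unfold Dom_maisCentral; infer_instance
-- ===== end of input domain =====

-- B replaces A's recursion by one iterative pass with a running best (simpler, O(1) space); return values proved equal on Pre_.

-- d['x'] / d['y']: first-match lookup; Pre_ excludes the inputs where Python raises KeyError (get? = none), so the default 0 is never reached on Pre_.
def pvLook (d : List (String × Int)) (k : String) : Int := ((PySem.Dict.mk d).get? k).getD 0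

-- ===== PORT A =====
def maisCentral (l : List (List (String × Int))) : List (String × Int) :=
  match l with
  | [] => []          -- 'h,*t=l' raises ValueError on []; excluded by Pre_
  | h :: t =>
    if t = [] then h  -- '[h]==l' with l = h::t holds exactly when t == []
    else
      let rt := maisCentral t
      let x1 := pvLook rt "x"
      let y1 := pvLook rt "y"
      let x := pvLook h "x"
      let y := pvLook h "y"
      let d1 := PySem.Int.bxor x1 2 + PySem.Int.bxor y1 2
      let d := PySem.Int.bxor x 2 + PySem.Int.bxor y 2
      if d ≤ d1 then h else rt

-- ===== PORT B =====
def pvDist (e : List (String × Int)) : Int :=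
  PySem.Int.bxor (pvLook e "x") 2 + PySem.Int.bxor (pvLook e "y") 2

def maisCentral_alt (l : List (List (String × Int))) : List (String × Int) :=
  match l with
  | [] => []          -- 'first, *rest = l' raises ValueError on []; excluded by Pre_
  | first :: rest =>
    rest.foldl (fun best e => if pvDist e < pvDist best then e else best) first

-- ===== PRECONDITION & SPEC =====
-- Pre_ excludes exactly the inputs where Python A raises: the empty list (ValueError), and
-- lists of length ≥ 2 with some element missing key "x" or "y" (KeyError; a singleton is
-- returned without any lookup, so it needs no keys).
def Pre_maisCentral (l : List (List (String × Int))) : Prop :=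
  l ≠ [] ∧ (l.tail = [] ∨ ∀ d ∈ l, ((PySem.Dict.mk d).get? "x").isSome ∧ ((PySem.Dict.mk d).get? "y").isSome)
instance (l : List (List (String × Int))) : Decidable (Pre_maisCentral l) := by unfold Pre_maisCentral; infer_instance

def pvWitness_maisCentral : (List (List (String × Int))) := [[("x", 3), ("y", -1)], [("x", 0), ("y", 2)]]

def Spec_maisCentral (l : List (List (String × Int))) (out : List (String × Int)) : Prop := out = maisCentral_alt l
instance (l : List (List (String × Int))) (out : List (String × Int)) : Decidable (Spec_maisCentral l out) := by unfold Spec_maisCentral; infer_instance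

-- ===== CLAIM (what is proved, stated in full; the proofs are below) =====
def Claim_equal_maisCentral : Prop := ∀ (l : List (List (String × Int))), Dom_maisCentral l → Pre_maisCentral l → Spec_maisCentral l (maisCentral l)

-- ===== LEMMAS AND PROOFS =====

-- the fold's step, abbreviated for the lemmas
def pvStep (best e : List (String × Int)) : List (String × Int) :=
  if pvDist e < pvDist best then e else best

theorem pvFoldl_eq_step : ∀ (t : List (List (String × Int))) (b : List (String × Int)),
    t.foldl (fun best e => if pvDist e < pvDist best then e else best) b
      = t.foldl pvStep b := by
  intro t b
  rfl

-- (1) the fold never increases the distance of the accumulator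
theorem pvFoldl_dist_le : ∀ (t : List (List (String × Int))) (b : List (String × Int)),
    pvDist (t.foldl pvStep b) ≤ pvDist b := by
  intro t
  induction t with
  | nil => intro b; simp
  | cons e t' ih =>
    intro b
    simp only [List.foldl_cons]
    refine le_trans (ih (pvStep b e)) ?_
    unfold pvStep
    split_ifs with h
    · exact le_of_lt h
    · exact le_rfl

-- (2) a no-worse starting element c absorbs the comparison A makes at the end
theorem pvFoldl_absorb : ∀ (t : List (List (String × Int))) (b c : List (String × Int)),
    pvDist c ≤ pvDist b →
    (if pvDist c ≤ pvDist (t.foldl pvStep b) then c else t.foldl pvStep b) = t.foldl pvStep c := by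
  intro t
  induction t with
  | nil => intro b c h; simp [h]
  | cons e t' ih =>
    intro b c h
    simp only [List.foldl_cons]
    by_cases he : pvDist e < pvDist c
    · have hb : pvDist e < pvDist b := lt_of_lt_of_le he h
      have hsb : pvStep b e = e := by simp [pvStep, hb]
      have hsc : pvStep c e = e := by simp [pvStep, he]
      rw [hsb, hsc]
      have : pvDist (t'.foldl pvStep e) < pvDist c := lt_of_le_of_lt (pvFoldl_dist_le t' e) he
      simp [not_le.mpr this]
    · have hsc : pvStep c e = c := by simp [pvStep, he]
      rw [hsc]
      by_cases hb : pvDist e < pvDist b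
      · have hsb : pvStep b e = e := by simp [pvStep, hb]
        rw [hsb]
        exact ih e c (le_of_not_gt he)
      · have hsb : pvStep b e = b := by simp [pvStep, hb]
        rw [hsb]
        exact ih b c h

theorem pvMain : ∀ (t : List (List (String × Int))) (h : List (String × Int)),
    maisCentral (h :: t) = t.foldl pvStep h := by
  intro t
  induction t with
  | nil => intro h; simp [maisCentral]
  | cons e t' ih =>
    intro h
    have hA : maisCentral (h :: e :: t') =
        if pvDist h ≤ pvDist (maisCentral (e :: t')) then h else maisCentral (e :: t') := by
      rw [maisCentral, if_neg (List.cons_ne_nil e t')]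
      rfl
    rw [hA, ih e, List.foldl_cons]
    by_cases hc : pvDist h ≤ pvDist e
    · rw [show pvStep h e = h from if_neg (not_lt.mpr hc)]
      exact pvFoldl_absorb t' e h hc
    · rw [show pvStep h e = e from if_pos (lt_of_not_ge hc)]
      have hlt : pvDist (t'.foldl pvStep e) < pvDist h :=
        lt_of_le_of_lt (pvFoldl_dist_le t' e) (lt_of_not_ge hc)
      exact if_neg (not_le.mpr hlt)

-- ===== VERDICT (by name: the statement is the Claim_ definition above) =====
theorem maisCentral_spec : Claim_equal_maisCentral := by
  intro l _ hpre
  unfold Spec_maisCentral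
  match l with
  | [] => exact absurd rfl hpre.1
  | h :: t =>
    show maisCentral (h :: t)
        = t.foldl (fun best e => if pvDist e < pvDist best then e else best) h
    rw [pvFoldl_eq_step]
    exact pvMain t h
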